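-- pv_equiv track=rewrite | github.com/unmasSk/acolyte | src/acolyte/rag/retrieval/fuzzy_matcher.py | _parse_identifier
-- ===== SOURCE A (Python) =====
-- from typing import List, Set, Tuple
--
-- def _parse_identifier(identifier: str, style: str) -> List[str]:
--     """Parse identifier into component words."""
--     words = []
--
--     if style == "snake":
--         words = identifier.split("_")
--     elif style == "kebab":
--         words = identifier.split("-")
--     elif style in ("camel", "pascal"):
--         # Split on capital letters, handling sequences like HTTP, XML
--         current_word = []
--         for i, char in enumerate(identifier):
--             if char.isupper():
--                 if i > 0:
--                     # Check if next char is lowercase (new word boundary)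
--                     if i + 1 < len(identifier) and identifier[i + 1].islower():
--                         if current_word:
--                             words.append("".join(current_word).lower())
--                         current_word = [char]
--                     # Check if previous char was lowercase (new word boundary)
--                     elif i > 0 and identifier[i - 1].islower():
--                         if current_word:
--                             words.append("".join(current_word).lower())
--                         current_word = [char]
--                     else:
--                         # Part of uppercase sequence
--                         current_word.append(char)
--                 else:
--                     current_word.append(char)
--             else:
--                 current_word.append(char)
--         if current_word:
--             words.append("".join(current_word).lower())
--     else:
--         # Try to detect word boundaries heuristically
--         # For now, just treat as single word
--         words = [identifier.lower()]
--
--     return [w for w in words if w]  # Filter empty strings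
-- ===== SOURCE B (Python) =====
-- from typing import List
--
-- def _parse_identifier(identifier: str, style: str) -> List[str]:
--     """Parse identifier into component words (boundary-split reimplementation)."""
--     if style == "snake":
--         words = identifier.split("_")
--     elif style == "kebab":
--         words = identifier.split("-")
--     elif style in ("camel", "pascal"):
--         n = len(identifier)
--         bounds = [
--             i
--             for i in range(1, n)
--             if identifier[i].isupper()
--             and ((i + 1 < n and identifier[i + 1].islower()) or identifier[i - 1].islower())
--         ]
--         cuts = [0] + bounds + [n]
--         words = [identifier[a:b].lower() for a, b in zip(cuts, cuts[1:])]
--     else: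
--         words = [identifier.lower()]
--     return [w for w in words if w]
-- ===== Notes on version B (the rewrite author's own statement) =====
-- stated objective: idiomatic
-- what changed: The camel/pascal branch's current_word state machine is replaced by boundary-index tokenization: one comprehension collects the uppercase word-boundary indices, then the identifier is sliced between consecutive cuts and lowercased; snake/kebab/else branches are unchanged.
import Mathlib
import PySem

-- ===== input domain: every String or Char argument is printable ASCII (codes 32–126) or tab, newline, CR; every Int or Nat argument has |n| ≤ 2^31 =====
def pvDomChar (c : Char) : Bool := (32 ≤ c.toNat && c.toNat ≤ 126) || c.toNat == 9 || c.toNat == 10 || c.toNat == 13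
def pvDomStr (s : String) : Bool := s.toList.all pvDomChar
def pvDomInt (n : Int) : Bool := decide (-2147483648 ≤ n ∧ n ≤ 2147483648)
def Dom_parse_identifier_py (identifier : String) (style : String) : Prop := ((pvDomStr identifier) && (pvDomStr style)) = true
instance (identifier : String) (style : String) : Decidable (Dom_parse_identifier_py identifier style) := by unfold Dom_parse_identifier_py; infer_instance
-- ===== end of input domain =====

-- B replaces A's per-character current_word state machine (camel/pascal branch) by a
-- boundary-index tokenization: collect the uppercase word-boundary indices once, then
-- slice the identifier between consecutive cuts; objective: idiomatic, same behaviour.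

-- ===== PORT A =====
-- A's loop body: state = (words, current_word), input = (i, char)
def pvStepA (s : List Char) : (List (List Char) × List Char) → (Int × Char) → (List (List Char) × List Char)
  | (words, cur), (i, c) =>
    if PySem.Chars.isupper c then
      if 0 < i then
        if decide (i + 1 < (s.length : Int)) && PySem.Chars.islower (PySem.List.pyGetD s (i + 1) c) then
          ((if cur ≠ [] then words ++ [PySem.Chars.lower cur] else words), [c])
        else if decide (0 < i) && PySem.Chars.islower (PySem.List.pyGetD s (i - 1) c) then
          ((if cur ≠ [] then words ++ [PySem.Chars.lower cur] else words), [c])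
        else (words, cur ++ [c])
      else (words, cur ++ [c])
    else (words, cur ++ [c])

def parse_identifier_py (identifier : String) (style : String) : List String :=
  let words : List String :=
    if style == "snake" then (PySem.Str.split? identifier "_").getD []
    else if style == "kebab" then (PySem.Str.split? identifier "-").getD []
    else if style == "camel" || style == "pascal" then
      let s := identifier.toList
      let st := (PySem.List.enumerate s 0).foldl (pvStepA s) ([], [])
      (if st.2 ≠ [] then st.1 ++ [PySem.Chars.lower st.2] else st.1).map String.ofList
    else [PySem.Str.lower identifier]
  words.filter (fun w => w ≠ "")

-- ===== PORT B =====
-- B's boundary predicate: identifier[i] uppercase and (next or previous char lowercase)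
def pvBdB (s : List Char) (n : Nat) (i : Int) : Bool :=
  PySem.Chars.isupper (PySem.List.pyGetD s i ' ') &&
    ((decide (i + 1 < (n : Int)) && PySem.Chars.islower (PySem.List.pyGetD s (i + 1) ' ')) ||
     PySem.Chars.islower (PySem.List.pyGetD s (i - 1) ' '))

def parse_identifier_py_alt (identifier : String) (style : String) : List String :=
  let words : List String :=
    if style == "snake" then (PySem.Str.split? identifier "_").getD []
    else if style == "kebab" then (PySem.Str.split? identifier "-").getD []
    else if style == "camel" || style == "pascal" then
      let s := identifier.toList
      let n := s.length
      let bounds := (PySem.List.pyRange 1 (n : Int) 1).filter (pvBdB s n)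
      let cuts : List Int := 0 :: (bounds ++ [(n : Int)])
      (cuts.zip cuts.tail).map
        (fun p => String.ofList (PySem.Chars.lower (PySem.List.slice s (some p.1) (some p.2))))
    else [PySem.Str.lower identifier]
  words.filter (fun w => w ≠ "")

-- ===== PRECONDITION & SPEC =====
def Spec_parse_identifier_py (identifier : String) (style : String) (out : List String) : Prop := out = parse_identifier_py_alt identifier style
instance (identifier : String) (style : String) (out : List String) : Decidable (Spec_parse_identifier_py identifier style out) := by unfold Spec_parse_identifier_py; infer_instance

-- ===== CLAIM (what is proved, stated in full; the proofs are below) =====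
def Claim_equal_parse_identifier_py : Prop := ∀ (identifier : String) (style : String), Dom_parse_identifier_py identifier style → Spec_parse_identifier_py identifier style (parse_identifier_py identifier style)

-- ===== LEMMAS AND PROOFS =====

-- word-boundary predicate on Nat indices, as A's loop tests it
def pvFlush (s : List Char) (k : Nat) : Bool :=
  decide (0 < k) && PySem.Chars.isupper (s.getD k ' ') &&
    ((decide (k + 1 < s.length) && PySem.Chars.islower (s.getD (k + 1) ' ')) ||
     PySem.Chars.islower (s.getD (k - 1) ' '))

-- reference tokenizer: pieces of s from position k onward, current word cur
def pvAux (s : List Char) : Nat → List Char → List Char → List (List Char)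
  | _, cur, [] => if cur ≠ [] then [PySem.Chars.lower cur] else []
  | k, cur, c :: r =>
    if pvFlush s k then
      (if cur ≠ [] then [PySem.Chars.lower cur] else []) ++ pvAux s (k + 1) [c] r
    else pvAux s (k + 1) (cur ++ [c]) r

-- chained pieces of a cut list
def pvChain (s : List Char) : Int → List Int → List (List Char)
  | _, [] => []
  | a, b :: rest => PySem.Chars.lower (PySem.List.slice s (some a) (some b)) :: pvChain s b rest

-- A's running finalization
def pvFin (st : List (List Char) × List Char) : List (List Char) :=
  if st.2 ≠ [] then st.1 ++ [PySem.Chars.lower st.2] else st.1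

lemma pvGetD_nat (s : List Char) (m : Nat) (d : Char) :
    PySem.List.pyGetD s (m : Int) d = s.getD m d := by
  rw [PySem.List.pyGetD_of_nonneg _ _ (by positivity)]; simp

lemma pvGetD_congr (s : List Char) (m : Nat) (h : m < s.length) (d d' : Char) :
    s.getD m d = s.getD m d' := by
  rw [List.getD_eq_getElem _ _ h, List.getD_eq_getElem _ _ h]

lemma pvLower_ne (x : List Char) :
    (decide (PySem.Chars.lower x ≠ [])) = decide (x ≠ []) := by
  by_cases hx : x = [] <;> simp [hx, PySem.Chars.lower, List.map_eq_nil_iff]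

-- A's loop step at position k equals the pvFlush-driven step
lemma pvStepA_char (s : List Char) (k : Nat) (c : Char) (hk : k < s.length)
    (hc : s.getD k ' ' = c) (words : List (List Char)) (cur : List Char) :
    pvStepA s (words, cur) ((k : Int), c) =
      if pvFlush s k then ((if cur ≠ [] then words ++ [PySem.Chars.lower cur] else words), [c])
      else (words, cur ++ [c]) := by
  subst hc
  simp only [pvStepA]
  by_cases hk0 : 0 < k
  · have hki : (0 : Int) < (k : Int) := by exact_mod_cast hk0
    have e1 : ((k : Int) + 1) = (((k + 1 : Nat)) : Int) := by push_cast; ring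
    have e2 : ((k : Int) - 1) = (((k - 1 : Nat)) : Int) := by omega
    have c1eq : (decide ((k : Int) + 1 < (s.length : Int)) &&
        PySem.Chars.islower (PySem.List.pyGetD s ((k : Int) + 1) (s.getD k ' '))) =
        (decide (k + 1 < s.length) && PySem.Chars.islower (s.getD (k + 1) ' ')) := by
      by_cases hn : k + 1 < s.length
      · rw [e1, pvGetD_nat, pvGetD_congr s (k + 1) hn (s.getD k ' ') ' ']
        have hni : ((k : Int) + 1 < (s.length : Int)) := by exact_mod_cast hn
        simp [hn, hni]
      · have h2 : ¬ ((k : Int) + 1 < (s.length : Int)) := by exact_mod_cast hn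
        simp [hn, h2]
    have c2eq : PySem.Chars.islower (PySem.List.pyGetD s ((k : Int) - 1) (s.getD k ' ')) =
        PySem.Chars.islower (s.getD (k - 1) ' ') := by
      rw [e2, pvGetD_nat, pvGetD_congr s (k - 1) (by omega) (s.getD k ' ') ' ']
    rw [c1eq, c2eq]
    have hdk0 : decide ((0 : Int) < (k : Int)) = true := by simpa using hki
    rw [hdk0, Bool.true_and]
    have hfl : pvFlush s k = (PySem.Chars.isupper (s.getD k ' ') &&
        ((decide (k + 1 < s.length) && PySem.Chars.islower (s.getD (k + 1) ' ')) ||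
         PySem.Chars.islower (s.getD (k - 1) ' '))) := by
      simp [pvFlush, hk0]
    rw [hfl]
    by_cases hu : PySem.Chars.isupper (s.getD k ' ') = true
    · rw [if_pos hu, if_pos hki, hu, Bool.true_and]
      generalize (decide (k + 1 < s.length) && PySem.Chars.islower (s.getD (k + 1) ' ')) = b1
      generalize PySem.Chars.islower (s.getD (k - 1) ' ') = b2
      cases b1 <;> cases b2 <;> simp
    · have huf : PySem.Chars.isupper (s.getD k ' ') = false := by simpa using hu
      rw [if_neg hu, huf, Bool.false_and]
      simp
  · have hki : ¬ ((0 : Int) < (k : Int)) := by exact_mod_cast hk0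
    have hfl : pvFlush s k = false := by simp [pvFlush, hk0]
    rw [hfl]
    by_cases hu : PySem.Chars.isupper (s.getD k ' ') = true
    · rw [if_pos hu, if_neg hki]
      simp
    · rw [if_neg hu]
      simp

-- A's fold from position k equals pvAux
lemma pvA_fold (s : List Char) : ∀ (r : List Char) (k : Nat) (words : List (List Char)) (cur : List Char),
    r = s.drop k →
    pvFin ((PySem.List.enumerate r (k : Int)).foldl (pvStepA s) (words, cur)) =
      words ++ pvAux s k cur r := by
  intro r
  induction r with
  | nil =>
    intro k words cur _
    by_cases h : cur = [] <;> simp [PySem.List.enumerate_nil, pvFin, pvAux, h]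
  | cons c r' ih =>
    intro k words cur hr
    have hk : k < s.length := by
      by_contra h
      rw [List.drop_eq_nil_of_le (by omega)] at hr
      simp at hr
    have hdk : s[k] :: s.drop (k + 1) = s.drop k := List.getElem_cons_drop hk
    rw [← hdk] at hr
    have hc : c = s[k] := (List.cons_eq_cons.mp hr).1
    have hr' : r' = s.drop (k + 1) := (List.cons_eq_cons.mp hr).2
    have hcD : s.getD k ' ' = c := by rw [List.getD_eq_getElem _ _ hk, hc]
    rw [PySem.List.enumerate_cons, List.foldl_cons, pvStepA_char s k c hk hcD]
    have ecast : (k : Int) + 1 = ((k + 1 : Nat) : Int) := by push_cast; ring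
    by_cases hf : pvFlush s k
    · rw [if_pos hf, ecast, ih (k + 1) _ [c] hr']
      simp only [pvAux]
      rw [if_pos hf]
      by_cases h : cur = [] <;> simp [h, List.append_assoc]
    · rw [if_neg hf, ecast, ih (k + 1) words (cur ++ [c]) hr']
      simp only [pvAux]
      rw [if_neg hf]

-- B's boundary test at a Nat index equals A's flush test
lemma pvBd_eq_flush (s : List Char) (k : Nat) (hk : k < s.length) :
    (decide (0 < (k : Int)) && pvBdB s s.length (k : Int)) = pvFlush s k := by
  by_cases hk0 : 0 < k
  · have hki : (0 : Int) < (k : Int) := by exact_mod_cast hk0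
    have e1 : ((k : Int) + 1) = (((k + 1 : Nat)) : Int) := by push_cast; ring
    have e2 : ((k : Int) - 1) = (((k - 1 : Nat)) : Int) := by omega
    have hd : (decide ((k : Int) + 1 < (s.length : Int))) = decide (k + 1 < s.length) := by
      by_cases hn : k + 1 < s.length
      · simp [hn, show (k : Int) + 1 < (s.length : Int) from by exact_mod_cast hn]
      · simp [hn, show ¬ ((k : Int) + 1 < (s.length : Int)) from by exact_mod_cast hn]
    simp only [pvBdB, pvFlush, e1, e2, pvGetD_nat]
    simp [hd, hk0]
  · have hz : k = 0 := by omega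
    subst hz
    simp [pvFlush]

-- B's cut chain from position k equals pvAux
lemma pvB_chain (s : List Char) : ∀ (m a k : Nat), m = s.length - k → a ≤ k → k ≤ s.length →
    (pvChain s (a : Int)
        (((PySem.List.pyRange (k : Int) (s.length : Int) 1).filter
            (fun i => decide (0 < i) && pvBdB s s.length i)) ++ [(s.length : Int)])).filter
      (fun w => w ≠ []) =
    pvAux s k ((s.drop a).take (k - a)) (s.drop k) := by
  intro m
  induction m with
  | zero =>
    intro a k hm ha hk
    have hke : k = s.length := by omega
    subst hke
    rw [PySem.List.pyRange_one_eq_nil (le_refl _), List.drop_length]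
    simp only [List.filter_nil, List.nil_append, pvChain]
    rw [PySem.List.slice_natCast, List.filter_cons, pvLower_ne, List.filter_nil]
    by_cases h : (s.drop a).take (s.length - a) = [] <;> simp [pvAux, h]
  | succ m ih =>
    intro a k hm ha hk
    have hkl : k < s.length := by omega
    rw [PySem.List.pyRange_one_cons (by exact_mod_cast hkl), List.filter_cons,
      pvBd_eq_flush s k hkl]
    have ecast : (k : Int) + 1 = ((k + 1 : Nat) : Int) := by push_cast; ring
    have hdk : s[k] :: s.drop (k + 1) = s.drop k := List.getElem_cons_drop hkl
    by_cases hf : pvFlush s k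
    · rw [if_pos hf, List.cons_append]
      simp only [pvChain]
      rw [PySem.List.slice_natCast, List.filter_cons, pvLower_ne]
      rw [ecast, ih k (k + 1) (by omega) (by omega) (by omega)]
      have hcur1 : (s.drop k).take (k + 1 - k) = [s[k]] := by
        rw [show k + 1 - k = 1 from by omega, ← hdk]
        rfl
      rw [hcur1]
      conv_rhs => rw [← hdk]
      simp only [pvAux]
      rw [if_pos hf]
      by_cases h : (s.drop a).take (k - a) = [] <;> simp [h]
    · rw [if_neg hf, ecast, ih a (k + 1) (by omega) (by omega) (by omega)]
      have hcur : (s.drop a).take (k + 1 - a) = (s.drop a).take (k - a) ++ [s[k]] := by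
        rw [show k + 1 - a = (k - a) + 1 from by omega, List.take_succ]
        have hg : (s.drop a)[k - a]? = some s[k] := by
          rw [List.getElem?_drop, show a + (k - a) = k from by omega]
          exact List.getElem?_eq_getElem hkl
        rw [hg]
        rfl
      rw [hcur]
      conv_rhs => rw [← hdk]
      simp only [pvAux]
      rw [if_neg hf]

lemma pvAux_ne_nil (s : List Char) : ∀ (r : List Char) (k : Nat) (cur : List Char),
    [] ∉ pvAux s k cur r := by
  intro r
  induction r with
  | nil =>
    intro k cur
    by_cases h : cur = [] <;> simp [pvAux, h, PySem.Chars.lower, List.map_eq_nil_iff]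
  | cons c r' ih =>
    intro k cur
    by_cases hf : pvFlush s k
    · by_cases h : cur = [] <;>
        simp [pvAux, hf, h, PySem.Chars.lower, List.map_eq_nil_iff, ih]
    · simp [pvAux, hf, ih]

lemma pvZip_chain (s : List Char) : ∀ (rest : List Int) (a : Int),
    (((a :: rest).zip (a :: rest).tail).map
      (fun p => PySem.Chars.lower (PySem.List.slice s (some p.1) (some p.2)))) = pvChain s a rest := by
  intro rest
  induction rest with
  | nil => intro a; simp [pvChain]
  | cons b rest ih =>
    intro a
    simp only [List.tail_cons, List.zip_cons_cons, List.map_cons, pvChain]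
    exact congrArg _ (ih b)

lemma pvFilter_map_ofList (l : List (List Char)) :
    (l.map String.ofList).filter (fun w => w ≠ "") =
      (l.filter (fun w => w ≠ [])).map String.ofList := by
  rw [List.filter_map]
  congr 1
  apply List.filter_congr
  intro w _
  simp only [Function.comp]
  by_cases h : w = []
  · subst h
    have he : String.ofList ([] : List Char) = "" := by decide
    simp [he]
  · have hne : String.ofList w ≠ "" := by
      intro he
      have := congrArg String.toList he
      simp at this
      exact h this
    simp [h, hne]

lemma pvBounds_eq (s : List Char) :
    (PySem.List.pyRange 1 (s.length : Int) 1).filter (pvBdB s s.length) =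
      (PySem.List.pyRange 0 (s.length : Int) 1).filter
        (fun i => decide (0 < i) && pvBdB s s.length i) := by
  by_cases h : 0 < s.length
  · have h0 : (0 : Int) < (s.length : Int) := by exact_mod_cast h
    conv_rhs => rw [PySem.List.pyRange_one_cons h0, List.filter_cons]
    rw [if_neg (by simp)]
    exact List.filter_congr (fun i hi => by
      have h0i := (PySem.List.mem_pyRange_one.mp hi).1
      simp [show (0 : Int) < i from by omega])
  · have hl : s.length = 0 := by omega
    rw [hl]
    rw [PySem.List.pyRange_one_eq_nil (by norm_num), PySem.List.pyRange_one_eq_nil (by norm_num)]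
    rfl

-- ===== VERDICT (by name: the statement is the Claim_ definition above) =====
theorem parse_identifier_py_spec : Claim_equal_parse_identifier_py := by
  intro identifier style _
  unfold Spec_parse_identifier_py
  simp only [parse_identifier_py, parse_identifier_py_alt]
  by_cases h1 : (style == "snake") = true
  · rw [if_pos h1, if_pos h1]
  · rw [if_neg h1, if_neg h1]
    by_cases h2 : (style == "kebab") = true
    · rw [if_pos h2, if_pos h2]
    · rw [if_neg h2, if_neg h2]
      by_cases h3 : (style == "camel" || style == "pascal") = true
      · rw [if_pos h3, if_pos h3]
        set s := identifier.toList with hs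
        have hA : pvFin ((PySem.List.enumerate s (0 : Int)).foldl (pvStepA s) ([], [])) =
            pvAux s 0 [] s := by
          have h := pvA_fold s s 0 [] [] (by simp)
          simpa using h
        simp only [pvFin] at hA
        rw [hA]
        have hB := pvB_chain s s.length 0 0 (by omega) (le_refl 0) (by omega)
        simp only [Nat.cast_zero, Nat.sub_zero, List.take_zero, List.drop_zero] at hB
        rw [pvFilter_map_ofList, List.filter_eq_self.mpr (fun w hw => by
          have hne : w ≠ [] := fun he => pvAux_ne_nil s s 0 [] (he ▸ hw)
          simpa using hne)]
        rw [show (fun p : Int × Int =>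
            String.ofList (PySem.Chars.lower (PySem.List.slice s (some p.1) (some p.2)))) =
            String.ofList ∘ (fun p : Int × Int =>
              PySem.Chars.lower (PySem.List.slice s (some p.1) (some p.2))) from rfl,
          ← List.map_map, pvZip_chain, pvFilter_map_ofList, pvBounds_eq s, hB]
      · rw [if_neg h3, if_neg h3]
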